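-- pv_equiv track=rewrite | github.com/kmankuan/ChiPiLink | backend/routes/pingpong.py | calcular_estadisticas_partido
-- ===== SOURCE A (Python) =====
-- from typing import Optional, List, Dict, Any
--
-- def calcular_estadisticas_partido(historial_puntos: List[Dict]) -> Dict:
--     """Calcula estadísticas avanzadas del partido"""
--     if not historial_puntos:
--         return {}
--
--     stats = {
--         "total_puntos": len(historial_puntos),
--         "puntos_a": 0,
--         "puntos_b": 0,
--         "max_racha_a": 0,
--         "max_racha_b": 0,
--         "racha_actual_a": 0,
--         "racha_actual_b": 0,
--         "remontadas_a": 0,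
--         "remontadas_b": 0,
--         "mayor_desventaja_superada_a": 0,
--         "mayor_desventaja_superada_b": 0
--     }
--
--     racha_a = 0
--     racha_b = 0
--     max_desventaja_a = 0
--     max_desventaja_b = 0
--
--     puntos_a = 0
--     puntos_b = 0
--
--     for punto in historial_puntos:
--         anotador = punto.get("anotador")
--
--         if anotador == "a":
--             puntos_a += 1
--             stats["puntos_a"] += 1
--             racha_a += 1
--             racha_b = 0
--             if racha_a > stats["max_racha_a"]:
--                 stats["max_racha_a"] = racha_a
--         else:
--             puntos_b += 1
--             stats["puntos_b"] += 1
--             racha_b += 1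
--             racha_a = 0
--             if racha_b > stats["max_racha_b"]:
--                 stats["max_racha_b"] = racha_b
--
--         # Calcular desventaja
--         diff = puntos_a - puntos_b
--         if diff < 0 and abs(diff) > max_desventaja_a:
--             max_desventaja_a = abs(diff)
--         if diff > 0 and diff > max_desventaja_b:
--             max_desventaja_b = diff
--
--     stats["racha_actual_a"] = racha_a
--     stats["racha_actual_b"] = racha_b
--     stats["mayor_desventaja_superada_a"] = max_desventaja_a
--     stats["mayor_desventaja_superada_b"] = max_desventaja_b
--
--     return stats
-- ===== SOURCE B (Python) =====
-- from itertools import groupby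
--
-- def calcular_estadisticas_partido(historial_puntos):
--     """Estadisticas por descomposicion: etiquetas -> runs (groupby) -> prefijos."""
--     if not historial_puntos:
--         return {}
--     labels = [p.get("anotador") == "a" for p in historial_puntos]
--     runs = [(k, sum(1 for _ in g)) for k, g in groupby(labels)]
--     max_a = max((n for k, n in runs if k), default=0)
--     max_b = max((n for k, n in runs if not k), default=0)
--     last_k, last_n = runs[-1]
--     diff = 0
--     min_d = 0
--     max_d = 0
--     for k in labels:
--         diff += 1 if k else -1
--         min_d = min(min_d, diff)
--         max_d = max(max_d, diff)
--     puntos_a = sum(labels)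
--     return {
--         "total_puntos": len(labels),
--         "puntos_a": puntos_a,
--         "puntos_b": len(labels) - puntos_a,
--         "max_racha_a": max_a,
--         "max_racha_b": max_b,
--         "racha_actual_a": last_n if last_k else 0,
--         "racha_actual_b": 0 if last_k else last_n,
--         "remontadas_a": 0,
--         "remontadas_b": 0,
--         "mayor_desventaja_superada_a": -min_d,
--         "mayor_desventaja_superada_b": max_d,
--     }
-- ===== Notes on version B (the rewrite author's own statement) =====
-- stated objective: alternative
-- what changed: Replaces A's single mutating per-point loop over a stats dict by a decomposition: a boolean label list, itertools.groupby runs for the streaks (max run length per side, last run = current streak), a prefix-difference scan for the overcome-disadvantage maxima, and sum/len for the point counts, assembled into the dict at the end.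
import Mathlib
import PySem

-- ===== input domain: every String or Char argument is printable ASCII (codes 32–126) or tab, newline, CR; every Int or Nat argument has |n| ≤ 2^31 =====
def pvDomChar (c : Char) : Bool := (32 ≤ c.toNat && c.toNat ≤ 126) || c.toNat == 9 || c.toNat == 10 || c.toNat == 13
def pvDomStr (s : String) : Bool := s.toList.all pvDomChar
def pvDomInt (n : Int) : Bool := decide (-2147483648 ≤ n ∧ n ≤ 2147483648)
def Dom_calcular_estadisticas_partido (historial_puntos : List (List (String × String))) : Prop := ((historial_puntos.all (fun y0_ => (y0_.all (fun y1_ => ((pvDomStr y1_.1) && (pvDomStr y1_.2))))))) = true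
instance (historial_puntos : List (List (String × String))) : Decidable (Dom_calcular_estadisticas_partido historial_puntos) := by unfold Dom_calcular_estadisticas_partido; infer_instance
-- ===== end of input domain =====

-- B replaces A's single mutating loop over a stats dict by a decomposition into a label list,
-- groupby-style runs for the streaks, a prefix-difference scan, and sum/len for the counts
-- (objective: alternative; same O(n) cost).

-- ===== PORT A =====
-- loop body of A; state = (stats, racha_a, racha_b, max_desventaja_a, max_desventaja_b, puntos_a, puntos_b)
-- (stats["puntos_a"] += 1 is Dict.modify; the reads stats["max_racha_a"] / ["max_racha_b"] use getD 0 —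
--  exact here because those keys are always present in stats)
def pvStepA (s : PySem.Dict String Int × Int × Int × Int × Int × Int × Int)
    (punto : List (String × String)) :
    PySem.Dict String Int × Int × Int × Int × Int × Int × Int :=
  match s with
  | (stats, racha_a, racha_b, mda, mdb, puntos_a, puntos_b) =>
    let anotador := (PySem.Dict.mk punto).get? "anotador"
    let (stats, racha_a, racha_b, puntos_a, puntos_b) :=
      if anotador == some "a" then
        let puntos_a := puntos_a + 1
        let stats := stats.modify "puntos_a" 0 (· + 1)
        let racha_a := racha_a + 1
        let racha_b := (0 : Int)
        let stats := if racha_a > stats.getD "max_racha_a" 0 then stats.insert "max_racha_a" racha_a else stats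
        (stats, racha_a, racha_b, puntos_a, puntos_b)
      else
        let puntos_b := puntos_b + 1
        let stats := stats.modify "puntos_b" 0 (· + 1)
        let racha_b := racha_b + 1
        let racha_a := (0 : Int)
        let stats := if racha_b > stats.getD "max_racha_b" 0 then stats.insert "max_racha_b" racha_b else stats
        (stats, racha_a, racha_b, puntos_a, puntos_b)
    let diff := puntos_a - puntos_b
    let mda := if diff < 0 ∧ |diff| > mda then |diff| else mda
    let mdb := if diff > 0 ∧ diff > mdb then diff else mdb
    (stats, racha_a, racha_b, mda, mdb, puntos_a, puntos_b)

def calcular_estadisticas_partido (historial_puntos : List (List (String × String))) : List (String × Int) :=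
  if historial_puntos = [] then []
  else
    let stats0 : PySem.Dict String Int := PySem.Dict.mk
      [("total_puntos", (historial_puntos.length : Int)), ("puntos_a", 0), ("puntos_b", 0),
       ("max_racha_a", 0), ("max_racha_b", 0), ("racha_actual_a", 0), ("racha_actual_b", 0),
       ("remontadas_a", 0), ("remontadas_b", 0), ("mayor_desventaja_superada_a", 0),
       ("mayor_desventaja_superada_b", 0)]
    match historial_puntos.foldl pvStepA (stats0, 0, 0, 0, 0, 0, 0) with
    | (stats, racha_a, racha_b, mda, mdb, _, _) =>
      (((((stats.insert "racha_actual_a" racha_a).insert "racha_actual_b" racha_b).insert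
          "mayor_desventaja_superada_a" mda).insert "mayor_desventaja_superada_b" mdb)).items

-- ===== PORT B =====
-- the label of one point: did 'a' score it? (anything else counts for b, as in A's else-branch)
def pvLbl (p : List (String × String)) : Bool := (PySem.Dict.mk p).get? "anotador" == some "a"

-- itertools.groupby over the labels, summarised as (value, run length) pairs, built left to right
def pvPushRun (acc : List (Bool × Int)) (b : Bool) : List (Bool × Int) :=
  match acc.getLast? with
  | none => [(b, 1)]
  | some (c, n) => if b == c then acc.dropLast ++ [(c, n + 1)] else acc ++ [(b, 1)]

def pvRuns (labels : List Bool) : List (Bool × Int) := labels.foldl pvPushRun []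

def calcular_estadisticas_partido_alt (historial_puntos : List (List (String × String))) : List (String × Int) :=
  if historial_puntos = [] then []
  else
    let labels := historial_puntos.map pvLbl
    let runs := pvRuns labels
    let max_a := PySem.List.maxD ((runs.filter (fun r => r.1)).map (fun r => r.2)) (fun v => v) 0
    let max_b := PySem.List.maxD ((runs.filter (fun r => !r.1)).map (fun r => r.2)) (fun v => v) 0
    let last := (PySem.List.pyGet? runs (-1)).getD (true, 0)
    let dmm := labels.foldl
      (fun (s : Int × Int × Int) k =>
        let d := s.1 + (if k then (1 : Int) else -1)
        (d, min s.2.1 d, max s.2.2 d)) (0, 0, 0)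
    let puntos_a := (labels.map (fun k => if k then (1 : Int) else 0)).sum
    [("total_puntos", (labels.length : Int)), ("puntos_a", puntos_a),
     ("puntos_b", (labels.length : Int) - puntos_a), ("max_racha_a", max_a),
     ("max_racha_b", max_b), ("racha_actual_a", if last.1 then last.2 else 0),
     ("racha_actual_b", if last.1 then 0 else last.2), ("remontadas_a", 0), ("remontadas_b", 0),
     ("mayor_desventaja_superada_a", -dmm.2.1), ("mayor_desventaja_superada_b", dmm.2.2)]

-- ===== PRECONDITION & SPEC =====
def Spec_calcular_estadisticas_partido (historial_puntos : List (List (String × String))) (out : List (String × Int)) : Prop := out = calcular_estadisticas_partido_alt historial_puntos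
instance (historial_puntos : List (List (String × String))) (out : List (String × Int)) : Decidable (Spec_calcular_estadisticas_partido historial_puntos out) := by unfold Spec_calcular_estadisticas_partido; infer_instance

-- ===== CLAIM (what is proved, stated in full; the proofs are below) =====
def Claim_equal_calcular_estadisticas_partido : Prop := ∀ (historial_puntos : List (List (String × String))), Dom_calcular_estadisticas_partido historial_puntos → Spec_calcular_estadisticas_partido historial_puntos (calcular_estadisticas_partido historial_puntos)

-- ===== LEMMAS AND PROOFS =====

-- the shape A's stats dict keeps throughout the loop
def pvCanon (n pa pb ma mb : Int) : PySem.Dict String Int := PySem.Dict.mk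
  [("total_puntos", n), ("puntos_a", pa), ("puntos_b", pb),
   ("max_racha_a", ma), ("max_racha_b", mb), ("racha_actual_a", 0), ("racha_actual_b", 0),
   ("remontadas_a", 0), ("remontadas_b", 0), ("mayor_desventaja_superada_a", 0),
   ("mayor_desventaja_superada_b", 0)]

-- B's run-derived quantities: (trailing a-run, trailing b-run, max a-run, max b-run)
def pvQuad (r : List (Bool × Int)) : Int × Int × Int × Int :=
  ((match r.getLast? with | some (c, n) => if c then n else 0 | none => 0),
   (match r.getLast? with | some (c, n) => if c then 0 else n | none => 0),
   PySem.List.maxD ((r.filter (fun x => x.1)).map (fun x => x.2)) (fun v => v) 0,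
   PySem.List.maxD ((r.filter (fun x => !x.1)).map (fun x => x.2)) (fun v => v) 0)

-- the same four quantities as a single left fold (streak automaton)
def pvQuadF (L : List Bool) : Int × Int × Int × Int :=
  L.foldl (fun q b =>
    if b then (q.1 + 1, 0, max q.2.2.1 (q.1 + 1), q.2.2.2)
    else (0, q.2.1 + 1, q.2.2.1, max q.2.2.2 (q.2.1 + 1))) (0, 0, 0, 0)

-- B's prefix-difference fold
def pvDmm (L : List Bool) : Int × Int × Int :=
  L.foldl (fun (s : Int × Int × Int) k =>
    let d := s.1 + (if k then (1 : Int) else -1)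
    (d, min s.2.1 d, max s.2.2 d)) (0, 0, 0)

-- B's point count
def pvCnt (L : List Bool) : Int := (L.map (fun k => if k then (1 : Int) else 0)).sum

lemma pvMax?_append_singleton (xs : List Int) (x : Int) :
    PySem.List.max? (xs ++ [x]) (fun v => v) =
      some (match PySem.List.max? xs (fun v => v) with | none => x | some m => max m x) := by
  simp only [PySem.List.max?, List.foldl_append, List.foldl_cons, List.foldl_nil]
  generalize List.foldl _ (none : Option Int) xs = r
  match r with
  | none => simp
  | some m =>
    simp only
    split_ifs with hlt
    · simp [max_eq_right (le_of_lt hlt)]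
    · rw [max_eq_left (by omega)]

lemma pvMaxD_append_singleton (xs : List Int) (x : Int) :
    PySem.List.maxD (xs ++ [x]) (fun v => v) 0 =
      match PySem.List.max? xs (fun v => v) with | none => x | some m => max m x := by
  simp [PySem.List.maxD, pvMax?_append_singleton]

lemma pvMaxD_extend (fa : List Int) (k x : Int) (hkx : k ≤ x) :
    max (PySem.List.maxD (fa ++ [k]) (fun v => v) 0) x =
      PySem.List.maxD (fa ++ [x]) (fun v => v) 0 := by
  rw [pvMaxD_append_singleton, pvMaxD_append_singleton]
  rcases PySem.List.max? fa (fun v => v) with _ | m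
  · simpa using max_eq_right hkx
  · simp only
    rw [max_assoc, max_eq_right hkx]

lemma pvMaxD_new (fa : List Int) :
    max (PySem.List.maxD fa (fun v => v) 0) 1 =
      PySem.List.maxD (fa ++ [1]) (fun v => v) 0 := by
  rw [pvMaxD_append_singleton]
  rcases h : PySem.List.max? fa (fun v => v) with _ | m
  · simp [PySem.List.maxD, h]
  · simp [PySem.List.maxD, h]

lemma pvRuns_append (L : List Bool) (b : Bool) :
    pvRuns (L ++ [b]) = pvPushRun (pvRuns L) b := by
  simp [pvRuns, List.foldl_append]

lemma pvQuadF_eq (L : List Bool) : pvQuadF L = pvQuad (pvRuns L) := by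
  induction L using List.reverseRecOn with
  | nil => simp [pvQuadF, pvQuad, pvRuns, PySem.List.maxD, PySem.List.max?]
  | append_singleton L b ih =>
    rw [pvQuadF, List.foldl_append, ← pvQuadF, ih, pvRuns_append, pvPushRun]
    rcases hL : (pvRuns L).getLast? with _ | ⟨c, n⟩
    · rw [List.getLast?_eq_none_iff] at hL
      cases b <;> simp [pvQuad, hL, PySem.List.maxD, PySem.List.max?]
    · obtain ⟨D, hdec⟩ : ∃ D, pvRuns L = D ++ [(c, n)] :=
        ⟨(pvRuns L).dropLast, by conv_lhs => rw [← List.dropLast_append_getLast? _ hL]⟩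
      rw [hdec] at *
      cases b <;> cases c <;>
        simp only [beq_iff_eq, Bool.true_eq_false, Bool.false_eq_true, if_true, if_false,
          reduceIte, List.dropLast_concat, pvQuad, List.getLast?_concat, List.filter_append,
          List.map_append, List.filter_cons, List.filter_nil, List.map_cons, List.map_nil,
          Bool.not_true, Bool.not_false, decide_true, decide_false, List.append_nil,
          List.foldl_cons, List.foldl_nil, Prod.mk.injEq, zero_add, and_true, true_and]
      · exact pvMaxD_extend _ n (n + 1) (by omega)
      · exact pvMaxD_new _
      · exact pvMaxD_new _
      · exact pvMaxD_extend _ n (n + 1) (by omega)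

lemma pvDmm_props (L : List Bool) :
    (pvDmm L).1 = pvCnt L - ((L.length : Int) - pvCnt L) ∧ (pvDmm L).2.1 ≤ 0 ∧ 0 ≤ (pvDmm L).2.2 := by
  induction L using List.reverseRecOn with
  | nil => simp [pvDmm, pvCnt]
  | append_singleton L b ih =>
    obtain ⟨h1, h2, h3⟩ := ih
    simp only [pvDmm, List.foldl_append, List.foldl_cons, List.foldl_nil] at *
    simp only [pvCnt, List.map_append, List.sum_append, List.length_append,
      List.map_cons, List.map_nil, List.sum_cons, List.sum_nil] at *
    cases b <;> simp_all <;> omega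

lemma pvStepA_canon (n pa pb ma mb ra rb mda mdb : Int) (p : List (String × String)) :
    pvStepA (pvCanon n pa pb ma mb, ra, rb, mda, mdb, pa, pb) p =
      (if pvLbl p then
        (pvCanon n (pa + 1) pb (max ma (ra + 1)) mb, ra + 1, 0,
         (if pa + 1 - pb < 0 ∧ |pa + 1 - pb| > mda then |pa + 1 - pb| else mda),
         (if pa + 1 - pb > 0 ∧ pa + 1 - pb > mdb then pa + 1 - pb else mdb), pa + 1, pb)
      else
        (pvCanon n pa (pb + 1) ma (max mb (rb + 1)), 0, rb + 1,
         (if pa - (pb + 1) < 0 ∧ |pa - (pb + 1)| > mda then |pa - (pb + 1)| else mda),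
         (if pa - (pb + 1) > 0 ∧ pa - (pb + 1) > mdb then pa - (pb + 1) else mdb), pa, pb + 1)) := by
  cases hb : ((PySem.Dict.mk p).get? "anotador" == some "a")
  · have e : pvStepA (pvCanon n pa pb ma mb, ra, rb, mda, mdb, pa, pb) p =
        ((if rb + 1 > mb then pvCanon n pa (pb + 1) ma (rb + 1) else pvCanon n pa (pb + 1) ma mb),
         0, rb + 1,
         (if pa - (pb + 1) < 0 ∧ |pa - (pb + 1)| > mda then |pa - (pb + 1)| else mda),
         (if pa - (pb + 1) > 0 ∧ pa - (pb + 1) > mdb then pa - (pb + 1) else mdb), pa, pb + 1) := by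
      unfold pvStepA
      simp only [hb, Bool.false_eq_true, if_false, reduceIte]
      rfl
    rw [e]
    simp only [pvLbl, hb, Bool.false_eq_true, if_false]
    rcases lt_or_ge mb (rb + 1) with h | h
    · rw [if_pos (by omega), max_eq_right (by omega)]
    · rw [if_neg (by omega), max_eq_left (by omega)]
  · have e : pvStepA (pvCanon n pa pb ma mb, ra, rb, mda, mdb, pa, pb) p =
        ((if ra + 1 > ma then pvCanon n (pa + 1) pb (ra + 1) mb else pvCanon n (pa + 1) pb ma mb),
         ra + 1, 0,
         (if pa + 1 - pb < 0 ∧ |pa + 1 - pb| > mda then |pa + 1 - pb| else mda),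
         (if pa + 1 - pb > 0 ∧ pa + 1 - pb > mdb then pa + 1 - pb else mdb), pa + 1, pb) := by
      unfold pvStepA
      simp only [hb, if_true, reduceIte]
      rfl
    rw [e]
    simp only [pvLbl, hb, if_true]
    rcases lt_or_ge ma (ra + 1) with h | h
    · rw [if_pos (by omega), max_eq_right (by omega)]
    · rw [if_neg (by omega), max_eq_left (by omega)]

lemma pvMda_step (m d : Int) (hm : m ≤ 0) :
    (if d < 0 ∧ |d| > -m then |d| else -m) = -(min m d) := by
  rcases abs_cases d with ⟨h1, h2⟩ | ⟨h1, h2⟩ <;> rw [h1, min_def] <;> split_ifs <;> omega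

lemma pvMdb_step (M d : Int) (hM : 0 ≤ M) :
    (if d > 0 ∧ d > M then d else M) = max M d := by
  rw [max_def]; split_ifs <;> omega

lemma pvCnt_append (L : List Bool) (b : Bool) :
    pvCnt (L ++ [b]) = pvCnt L + (if b then 1 else 0) := by
  cases b <;> simp [pvCnt]

lemma pvDmm_append (L : List Bool) (b : Bool) :
    pvDmm (L ++ [b]) =
      ((pvDmm L).1 + (if b then 1 else -1),
       min (pvDmm L).2.1 ((pvDmm L).1 + (if b then 1 else -1)),
       max (pvDmm L).2.2 ((pvDmm L).1 + (if b then 1 else -1))) := by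
  simp [pvDmm, List.foldl_append]

lemma pvQuadF_append (L : List Bool) (b : Bool) :
    pvQuadF (L ++ [b]) =
      if b then ((pvQuadF L).1 + 1, 0, max (pvQuadF L).2.2.1 ((pvQuadF L).1 + 1), (pvQuadF L).2.2.2)
      else (0, (pvQuadF L).2.1 + 1, (pvQuadF L).2.2.1, max (pvQuadF L).2.2.2 ((pvQuadF L).2.1 + 1)) := by
  cases b <;> simp [pvQuadF, List.foldl_append]

lemma pvMain (hp : List (List (String × String))) (n : Int) :
    hp.foldl pvStepA (pvCanon n 0 0 0 0, 0, 0, 0, 0, 0, 0) =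
      (pvCanon n (pvCnt (hp.map pvLbl)) (((hp.map pvLbl).length : Int) - pvCnt (hp.map pvLbl))
          (pvQuadF (hp.map pvLbl)).2.2.1 (pvQuadF (hp.map pvLbl)).2.2.2,
       (pvQuadF (hp.map pvLbl)).1, (pvQuadF (hp.map pvLbl)).2.1,
       -(pvDmm (hp.map pvLbl)).2.1, (pvDmm (hp.map pvLbl)).2.2,
       pvCnt (hp.map pvLbl), ((hp.map pvLbl).length : Int) - pvCnt (hp.map pvLbl)) := by
  induction hp using List.reverseRecOn with
  | nil => simp [pvCnt, pvQuadF, pvDmm]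
  | append_singleton hp p ih =>
    obtain ⟨hd1, hd2, hd3⟩ := pvDmm_props (hp.map pvLbl)
    rw [List.foldl_append, List.foldl_cons, List.foldl_nil, ih, pvStepA_canon]
    simp only [List.map_append, List.map_cons, List.map_nil]
    rw [pvCnt_append, pvDmm_append, pvQuadF_append, List.length_append]
    cases hb : pvLbl p
    · have ed : pvCnt (hp.map pvLbl) - (((hp.map pvLbl).length : Int) - pvCnt (hp.map pvLbl) + 1)
          = (pvDmm (hp.map pvLbl)).1 + -1 := by omega
      simp only [hb, Bool.false_eq_true, if_false, reduceIte]
      rw [ed, pvMda_step _ _ hd2, pvMdb_step _ _ hd3]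
      simp only [List.length_cons, List.length_nil, Nat.cast_add, Nat.cast_one, Nat.cast_zero,
        add_zero, zero_add]
      ring_nf
    · have ed : pvCnt (hp.map pvLbl) + 1 - (((hp.map pvLbl).length : Int) - pvCnt (hp.map pvLbl))
          = (pvDmm (hp.map pvLbl)).1 + 1 := by omega
      simp only [hb, if_true, reduceIte]
      rw [ed, pvMda_step _ _ hd2, pvMdb_step _ _ hd3]
      simp only [List.length_cons, List.length_nil, Nat.cast_add, Nat.cast_one, Nat.cast_zero,
        add_zero, zero_add]
      ring_nf

lemma pvLast_a (r : List (Bool × Int)) :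
    (if ((PySem.List.pyGet? r (-1)).getD (true, 0)).1 then ((PySem.List.pyGet? r (-1)).getD (true, 0)).2
     else 0) = (pvQuad r).1 := by
  rw [PySem.List.pyGet?_neg_one]
  rcases hL : r.getLast? with _ | ⟨c, n⟩
  · simp [pvQuad, hL]
  · cases c <;> simp [pvQuad, hL]

lemma pvLast_b (r : List (Bool × Int)) :
    (if ((PySem.List.pyGet? r (-1)).getD (true, 0)).1 then 0
     else ((PySem.List.pyGet? r (-1)).getD (true, 0)).2) = (pvQuad r).2.1 := by
  rw [PySem.List.pyGet?_neg_one]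
  rcases hL : r.getLast? with _ | ⟨c, n⟩
  · simp [pvQuad, hL]
  · cases c <;> simp [pvQuad, hL]

lemma pvA_closed (hp : List (List (String × String))) (h : ¬ hp = []) :
    calcular_estadisticas_partido hp =
      [("total_puntos", (hp.length : Int)), ("puntos_a", pvCnt (hp.map pvLbl)),
       ("puntos_b", ((hp.map pvLbl).length : Int) - pvCnt (hp.map pvLbl)),
       ("max_racha_a", (pvQuadF (hp.map pvLbl)).2.2.1),
       ("max_racha_b", (pvQuadF (hp.map pvLbl)).2.2.2),
       ("racha_actual_a", (pvQuadF (hp.map pvLbl)).1),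
       ("racha_actual_b", (pvQuadF (hp.map pvLbl)).2.1),
       ("remontadas_a", 0), ("remontadas_b", 0),
       ("mayor_desventaja_superada_a", -(pvDmm (hp.map pvLbl)).2.1),
       ("mayor_desventaja_superada_b", (pvDmm (hp.map pvLbl)).2.2)] := by
  have hm' : hp.foldl pvStepA
      (PySem.Dict.mk
        [("total_puntos", (hp.length : Int)), ("puntos_a", 0), ("puntos_b", 0),
         ("max_racha_a", 0), ("max_racha_b", 0), ("racha_actual_a", 0), ("racha_actual_b", 0),
         ("remontadas_a", 0), ("remontadas_b", 0), ("mayor_desventaja_superada_a", 0),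
         ("mayor_desventaja_superada_b", 0)], 0, 0, 0, 0, 0, 0) =
      (pvCanon (hp.length : Int) (pvCnt (hp.map pvLbl))
          (((hp.map pvLbl).length : Int) - pvCnt (hp.map pvLbl))
          (pvQuadF (hp.map pvLbl)).2.2.1 (pvQuadF (hp.map pvLbl)).2.2.2,
       (pvQuadF (hp.map pvLbl)).1, (pvQuadF (hp.map pvLbl)).2.1,
       -(pvDmm (hp.map pvLbl)).2.1, (pvDmm (hp.map pvLbl)).2.2,
       pvCnt (hp.map pvLbl), ((hp.map pvLbl).length : Int) - pvCnt (hp.map pvLbl)) :=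
    pvMain hp (hp.length : Int)
  unfold calcular_estadisticas_partido
  rw [if_neg h]
  simp only []
  rw [hm']
  rfl

-- ===== VERDICT (by name: the statement is the Claim_ definition above) =====
theorem calcular_estadisticas_partido_spec : Claim_equal_calcular_estadisticas_partido := by
  unfold Claim_equal_calcular_estadisticas_partido
  intro hp _
  unfold Spec_calcular_estadisticas_partido
  by_cases h : hp = []
  · rw [h]; rfl
  · rw [pvA_closed hp h, pvQuadF_eq]
    unfold calcular_estadisticas_partido_alt
    rw [if_neg h]
    simp only [List.length_map]
    rw [pvLast_a (pvRuns (hp.map pvLbl)), pvLast_b (pvRuns (hp.map pvLbl))]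
    rfl
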